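-- pv_equiv track=rewrite | github.com/Krajzys/advent_of_code | day19/1solve.py | is_same_b2b_dist
-- ===== SOURCE A (Python) =====
-- def is_same_b2b_dist(dis1, dis2):
--     dis1 = dis1[:]
--     dis2 = list(abs(x) for x in dis2[:])
--     for i in dis1:
--         if abs(i) in dis2:
--             dis2.remove(abs(i))
--             continue
--         break
--     else:
--         return True
--     return False
-- ===== SOURCE B (Python) =====
-- def is_same_b2b_dist(dis1, dis2):
--     a = sorted(abs(x) for x in dis1)
--     b = sorted(abs(x) for x in dis2)
--     i = j = 0
--     while i < len(a):
--         while j < len(b) and b[j] < a[i]: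
--             j += 1
--         if j < len(b) and b[j] == a[i]:
--             i += 1
--             j += 1
--         else:
--             return False
--     return True
-- ===== Notes on version B (the rewrite author's own statement) =====
-- stated objective: faster
-- what changed: Replaces the per-element membership scan and remove() (quadratic) with sorting both abs-lists once and a single two-pointer merge pass.
import Mathlib
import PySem

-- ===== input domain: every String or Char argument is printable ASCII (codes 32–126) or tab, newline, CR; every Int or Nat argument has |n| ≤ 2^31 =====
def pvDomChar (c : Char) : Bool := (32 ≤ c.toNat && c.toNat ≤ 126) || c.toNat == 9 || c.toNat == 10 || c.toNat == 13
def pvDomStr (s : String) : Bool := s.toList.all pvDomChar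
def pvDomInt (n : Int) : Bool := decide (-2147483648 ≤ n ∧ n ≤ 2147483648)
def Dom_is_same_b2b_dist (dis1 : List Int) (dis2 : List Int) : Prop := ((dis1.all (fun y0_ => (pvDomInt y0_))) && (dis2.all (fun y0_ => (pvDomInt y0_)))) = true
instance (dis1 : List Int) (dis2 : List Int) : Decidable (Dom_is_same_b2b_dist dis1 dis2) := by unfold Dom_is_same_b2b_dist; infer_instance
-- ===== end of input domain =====

-- B replaces A's per-element membership scan + remove() with sort-both-abs-lists and one
-- two-pointer merge pass (objective: faster; A does not mutate its arguments, nor does B).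

-- ===== PORT A =====
-- A's for-loop over dis1 with the mutated working copy of [abs(x) for x in dis2] as state;
-- `dis2.remove(abs(i))` (first occurrence, known present) is `d2.erase |i|`.
def b2bLoopA : List Int → List Int → Bool
  | [], _ => true
  | i :: rest, d2 => if |i| ∈ d2 then b2bLoopA rest (d2.erase |i|) else false

def is_same_b2b_dist (dis1 : List Int) (dis2 : List Int) : Bool :=
  b2bLoopA dis1 (dis2.map (fun x => |x|))

-- ===== PORT B =====
-- Source B's index-based two-pointer while loop, as structural recursion on the two sorted lists:
-- advancing j past b[j] < a[i] = dropping the head of the second list.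
def b2bMerge : List Int → List Int → Bool
  | [], _ => true
  | _ :: _, [] => false
  | x :: xs, y :: ys =>
      if y < x then b2bMerge (x :: xs) ys
      else if y = x then b2bMerge xs ys
      else false

def is_same_b2b_dist_alt (dis1 : List Int) (dis2 : List Int) : Bool :=
  b2bMerge (PySem.List.sorted (dis1.map (fun x => |x|)) (fun x => x) false)
           (PySem.List.sorted (dis2.map (fun x => |x|)) (fun x => x) false)

-- ===== PRECONDITION & SPEC =====
def Spec_is_same_b2b_dist (dis1 : List Int) (dis2 : List Int) (out : Bool) : Prop := out = is_same_b2b_dist_alt dis1 dis2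
instance (dis1 : List Int) (dis2 : List Int) (out : Bool) : Decidable (Spec_is_same_b2b_dist dis1 dis2 out) := by unfold Spec_is_same_b2b_dist; infer_instance

-- ===== CLAIM (what is proved, stated in full; the proofs are below) =====
def Claim_equal_is_same_b2b_dist : Prop := ∀ (dis1 : List Int) (dis2 : List Int), Dom_is_same_b2b_dist dis1 dis2 → Spec_is_same_b2b_dist dis1 dis2 (is_same_b2b_dist dis1 dis2)

-- ===== LEMMAS AND PROOFS =====

theorem count_cons' (a b : Int) (l : List Int) :
    (b :: l).count a = l.count a + (if b = a then 1 else 0) := by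
  simp [List.count_cons]

theorem count_erase' (a b : Int) (l : List Int) :
    (l.erase b).count a = l.count a - (if a = b then 1 else 0) := by
  by_cases h : a = b
  · subst h; rw [if_pos rfl, List.count_erase_self]
  · rw [if_neg h, List.count_erase_of_ne h]; omega

-- A's loop succeeds iff count-wise (multiset) inclusion of the abs-images holds.
theorem b2bLoopA_iff (l d : List Int) :
    b2bLoopA l d = true ↔ ∀ v, (l.map (fun x => |x|)).count v ≤ d.count v := by
  induction l generalizing d with
  | nil => simp [b2bLoopA]
  | cons i rest ih =>
      by_cases h : |i| ∈ d
      · rw [b2bLoopA, if_pos h, ih]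
        have hpos : 0 < d.count |i| := List.count_pos_iff.mpr h
        constructor
        · intro H v
          have hv := H v
          rw [count_erase'] at hv
          rw [List.map_cons, count_cons']
          by_cases hvi : v = |i|
          · subst hvi; rw [if_pos rfl] at hv ⊢; omega
          · rw [if_neg hvi] at hv
            rw [if_neg (fun hh => hvi hh.symm)]; omega
        · intro H v
          have hv := H v
          rw [List.map_cons, count_cons'] at hv
          rw [count_erase']
          by_cases hvi : v = |i|
          · subst hvi; rw [if_pos rfl] at hv ⊢; omega
          · rw [if_neg (fun hh => hvi hh.symm)] at hv
            rw [if_neg hvi]; omega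
      · rw [b2bLoopA, if_neg h]
        simp only [Bool.false_eq_true, false_iff]
        intro H
        have hv := H |i|
        have h0 : d.count |i| = 0 := List.count_eq_zero.mpr h
        rw [List.map_cons, count_cons', if_pos rfl, h0] at hv
        omega

-- The two-pointer merge on two ≤-sorted lists decides the same count-wise inclusion.
theorem b2bMerge_iff : ∀ (ys xs : List Int), xs.Pairwise (· ≤ ·) → ys.Pairwise (· ≤ ·) →
    (b2bMerge xs ys = true ↔ ∀ v, xs.count v ≤ ys.count v) := by
  intro ys
  induction ys with
  | nil =>
      intro xs hx _
      cases xs with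
      | nil => simp [b2bMerge]
      | cons x xs' =>
          simp only [b2bMerge, Bool.false_eq_true, false_iff]
          intro H
          have hv := H x
          rw [count_cons' x x xs', if_pos rfl, List.count_nil] at hv
          omega
  | cons y ys' ih =>
      intro xs hx hy
      cases xs with
      | nil => simp [b2bMerge]
      | cons x xs' =>
          by_cases hlt : y < x
          · rw [b2bMerge, if_pos hlt, ih (x :: xs') hx (List.pairwise_cons.mp hy).2]
            have hcount0 : (x :: xs').count y = 0 := by
              rw [List.count_eq_zero]
              intro hm
              rcases List.mem_cons.mp hm with hm | hm
              · omega
              · have := (List.pairwise_cons.mp hx).1 y hm; omega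
            constructor
            · intro H v
              have hv := H v
              rw [count_cons' v y ys']
              by_cases hvy : v = y
              · subst hvy; rw [hcount0]; omega
              · rw [if_neg (fun hh => hvy hh.symm)]; omega
            · intro H v
              have hv := H v
              rw [count_cons' v y ys'] at hv
              by_cases hvy : v = y
              · subst hvy; rw [hcount0]; omega
              · rw [if_neg (fun hh => hvy hh.symm)] at hv; omega
          · by_cases heq : y = x
            · subst heq
              rw [b2bMerge, if_neg hlt, if_pos rfl,
                  ih xs' (List.pairwise_cons.mp hx).2 (List.pairwise_cons.mp hy).2]
              constructor
              · intro H v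
                have hv := H v
                rw [count_cons' v y xs', count_cons' v y ys']; omega
              · intro H v
                have hv := H v
                rw [count_cons' v y xs', count_cons' v y ys'] at hv; omega
            · have hxy : x < y := by omega
              rw [b2bMerge, if_neg hlt, if_neg heq]
              simp only [Bool.false_eq_true, false_iff]
              intro H
              have hv := H x
              have h0 : (y :: ys').count x = 0 := by
                rw [List.count_eq_zero]
                intro hm
                rcases List.mem_cons.mp hm with hm | hm
                · omega
                · have := (List.pairwise_cons.mp hy).1 x hm; omega
              rw [h0, count_cons' x x xs', if_pos rfl] at hv
              omega

theorem count_sorted (l : List Int) (v : Int) :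
    (PySem.List.sorted l (fun x => x) false).count v = l.count v :=
  (PySem.List.sorted_perm l (fun x => x) false).count_eq v

-- ===== VERDICT (by name: the statement is the Claim_ definition above) =====
theorem is_same_b2b_dist_spec : Claim_equal_is_same_b2b_dist := by
  intro dis1 dis2 _
  unfold Spec_is_same_b2b_dist is_same_b2b_dist is_same_b2b_dist_alt
  have hA := b2bLoopA_iff dis1 (dis2.map (fun x => |x|))
  have hx : (PySem.List.sorted (dis1.map (fun x => |x|)) (fun x => x) false).Pairwise (· ≤ ·) :=
    PySem.List.sorted_pairwise _ _
  have hy : (PySem.List.sorted (dis2.map (fun x => |x|)) (fun x => x) false).Pairwise (· ≤ ·) :=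
    PySem.List.sorted_pairwise _ _
  have hB := b2bMerge_iff _ _ hx hy
  rw [Bool.eq_iff_iff, hA, hB]
  constructor <;> intro H v <;> have hv := H v <;>
    rw [count_sorted, count_sorted] at * <;> omega
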